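-- pv_equiv track=rewrite | github.com/liushuo20/essential | Sequence-composition-feature.py | subSeq
-- ===== SOURCE A (Python) =====
-- def subSeq(seq,w,k):
--     firstPhaseSubSeq=[]
--     secondPhaseSubSeq=[]
--     thirdPhaseSubSeq=[]
--     PhaseSubSeq=[]
--
--     if w!=1:
--         firstPhaseIndex=range(0,len(seq),3)
--         #print firstPhaseIndex
--         secondPhaseIndex=range(1,len(seq),3)
--         thirdPhaseIndex=range(2,len(seq),3)
--         seqIndex=range(0,len(seq))
--         for i1 in firstPhaseIndex:
--             if w-2+i1+k in seqIndex:
--                 #print w-2+i1+k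
--                 firstPhaseSubSeq.append(seq[i1:(i1+w-1)]+seq[w-2+i1+k])
--         for i2 in secondPhaseIndex:
--             if w-2+i2+k in seqIndex:
--
--                 secondPhaseSubSeq.append(seq[i2:(i2+w-1)]+seq[w-2+i2+k])
--         for i3 in thirdPhaseIndex:
--             #print thirdPhaseIndex
--             if w-2+i3+k in seqIndex:
--                 thirdPhaseSubSeq.append(seq[i3:(i3+w-1)]+seq[w-2+i3+k])
--                 #print 'sss'
--         PhaseSubSeq.append(firstPhaseSubSeq)
--         PhaseSubSeq.append(secondPhaseSubSeq)
--         PhaseSubSeq.append(thirdPhaseSubSeq)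
--         #print PhaseSubSeq
--         return PhaseSubSeq
--
--     else:
--         firstPhaseIndex=range(0,len(seq),3)
--         secondPhaseIndex=range(1,len(seq),3)
--         thirdPhaseIndex=range(2,len(seq),3)
--         for i1 in firstPhaseIndex:
--             firstPhaseSubSeq.append(seq[i1])
--         for i2 in secondPhaseIndex:
--             secondPhaseSubSeq.append(seq[i2])
--         for i3 in thirdPhaseIndex:
--             thirdPhaseSubSeq.append(seq[i3])
--         PhaseSubSeq.append(firstPhaseSubSeq)
--         PhaseSubSeq.append(secondPhaseSubSeq)
--         PhaseSubSeq.append(thirdPhaseSubSeq)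
--         return PhaseSubSeq
-- ===== SOURCE B (Python) =====
-- def subSeq(seq, w, k):
--     # Single index-dispatched pass instead of three strided loops.
--     n = len(seq)
--     buckets = [[], [], []]
--     if w == 1:
--         for i in range(n):
--             buckets[i % 3].append(seq[i])
--     else:
--         for i in range(n):
--             j = w - 2 + i + k
--             if 0 <= j < n:
--                 buckets[i % 3].append(seq[i:i + w - 1] + seq[j])
--     return buckets
-- ===== Notes on version B (the rewrite author's own statement) =====
-- stated objective: alternative
-- what changed: A's three separate strided loops (phases 0,1,2 over range(r, len, 3)) are replaced by a single pass over range(len(seq)) that dispatches each index into bucket i % 3.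
import Mathlib
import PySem

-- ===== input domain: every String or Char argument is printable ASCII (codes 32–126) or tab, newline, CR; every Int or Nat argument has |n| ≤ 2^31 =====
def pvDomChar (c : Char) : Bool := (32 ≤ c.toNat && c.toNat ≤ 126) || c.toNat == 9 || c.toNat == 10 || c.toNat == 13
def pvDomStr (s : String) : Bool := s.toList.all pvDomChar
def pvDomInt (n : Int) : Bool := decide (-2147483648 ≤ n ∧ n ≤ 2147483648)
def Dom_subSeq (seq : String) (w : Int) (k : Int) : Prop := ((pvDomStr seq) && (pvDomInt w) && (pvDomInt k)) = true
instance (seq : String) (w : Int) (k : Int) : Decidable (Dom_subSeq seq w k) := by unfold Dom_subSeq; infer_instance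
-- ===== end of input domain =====

-- B replaces A's three strided passes by one index-dispatched pass (i % 3 picks the bucket); same value, alternative decomposition.

-- shared item builders (both Pythons compute the identical expressions)
-- seq[i:(i+w-1)] + seq[w-2+i+k]  (the index is guarded in range in both programs, so .elim [] never fires)
def pvItem (cs : List Char) (w k i : Int) : String :=
  String.ofList (PySem.List.slice cs (some i) (some (i + w - 1)) ++
    (PySem.List.pyGet? cs (w - 2 + i + k)).elim [] (fun c => [c]))

-- seq[i]  (i drawn from range(len(seq)), always in range)
def pvChar (cs : List Char) (i : Int) : String :=
  String.ofList ((PySem.List.pyGet? cs i).elim [] (fun c => [c]))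

-- ===== PORT A =====
def subSeq (seq : String) (w : Int) (k : Int) : List (List String) :=
  let cs := seq.toList
  let n : Int := cs.length
  if w ≠ 1 then
    let first := (PySem.List.pyRange 0 n 3).foldl
      (fun acc i => if (decide (0 ≤ w - 2 + i + k) && decide (w - 2 + i + k < n)) then acc ++ [pvItem cs w k i] else acc) []
    let second := (PySem.List.pyRange 1 n 3).foldl
      (fun acc i => if (decide (0 ≤ w - 2 + i + k) && decide (w - 2 + i + k < n)) then acc ++ [pvItem cs w k i] else acc) []
    let third := (PySem.List.pyRange 2 n 3).foldl
      (fun acc i => if (decide (0 ≤ w - 2 + i + k) && decide (w - 2 + i + k < n)) then acc ++ [pvItem cs w k i] else acc) []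
    [first, second, third]
  else
    let first := (PySem.List.pyRange 0 n 3).foldl (fun acc i => acc ++ [pvChar cs i]) []
    let second := (PySem.List.pyRange 1 n 3).foldl (fun acc i => acc ++ [pvChar cs i]) []
    let third := (PySem.List.pyRange 2 n 3).foldl (fun acc i => acc ++ [pvChar cs i]) []
    [first, second, third]

-- ===== PORT B =====
-- buckets[i % 3].append(s) on the triple of buckets
def pvPut (t : List String × List String × List String) (i : Int) (s : String) :
    List String × List String × List String :=
  if PySem.Int.mod i 3 = 0 then (t.1 ++ [s], t.2.1, t.2.2)
  else if PySem.Int.mod i 3 = 1 then (t.1, t.2.1 ++ [s], t.2.2)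
  else (t.1, t.2.1, t.2.2 ++ [s])

def subSeq_alt (seq : String) (w : Int) (k : Int) : List (List String) :=
  let cs := seq.toList
  let n : Int := cs.length
  if w = 1 then
    let t := (PySem.List.pyRange 0 n 1).foldl (fun t i => pvPut t i (pvChar cs i)) ([], [], [])
    [t.1, t.2.1, t.2.2]
  else
    let t := (PySem.List.pyRange 0 n 1).foldl
      (fun t i => if (decide (0 ≤ w - 2 + i + k) && decide (w - 2 + i + k < n)) then pvPut t i (pvItem cs w k i) else t) ([], [], [])
    [t.1, t.2.1, t.2.2]

-- ===== PRECONDITION & SPEC =====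
def Spec_subSeq (seq : String) (w : Int) (k : Int) (out : List (List String)) : Prop := out = subSeq_alt seq w k
instance (seq : String) (w : Int) (k : Int) (out : List (List String)) : Decidable (Spec_subSeq seq w k out) := by unfold Spec_subSeq; infer_instance

-- ===== CLAIM (what is proved, stated in full; the proofs are below) =====
def Claim_equal_subSeq : Prop := ∀ (seq : String) (w : Int) (k : Int), Dom_subSeq seq w k → Spec_subSeq seq w k (subSeq seq w k)

-- ===== LEMMAS AND PROOFS =====

-- appending one more index to a phase-r strided range
lemma stride_succ (r m : ℕ) (hr : r < 3) :
    PySem.List.pyRange (r : Int) ((m : Int) + 1) 3 =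
      PySem.List.pyRange (r : Int) (m : Int) 3 ++ (if m % 3 = r then [(m : Int)] else []) := by
  rw [PySem.List.pyRange_of_pos _ _ (by norm_num), PySem.List.pyRange_of_pos _ _ (by norm_num)]
  by_cases h : m % 3 = r
  · have hC : (if (r : Int) < (m : Int) + 1 then (((m : Int) + 1 - r + 3 - 1) / 3).toNat else 0)
        = (if (r : Int) < (m : Int) then (((m : Int) - r + 3 - 1) / 3).toNat else 0) + 1 := by
      split_ifs <;> omega
    rw [hC, List.range_succ, List.map_append, h, if_pos rfl]
    congr 1
    simp only [List.map_cons, List.map_nil]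
    congr 1
    split_ifs <;> omega
  · rw [if_neg h, List.append_nil]
    congr 2
    split_ifs <;> omega

-- the single dispatched pass computes the three filtered strided passes
lemma tripleFold (p : Int → Bool) (g : Int → String) (m : ℕ) :
    ((List.range m).map (fun j : ℕ => (j : Int))).foldl
        (fun t i => if p i then pvPut t i (g i) else t) ([], [], [])
      = ((((PySem.List.pyRange 0 (m : Int) 3).filter p).map g),
         (((PySem.List.pyRange 1 (m : Int) 3).filter p).map g),
         (((PySem.List.pyRange 2 (m : Int) 3).filter p).map g)) := by
  induction m with
  | zero => simp [PySem.List.pyRange]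
  | succ m ih =>
      rw [List.range_succ, List.map_append, List.foldl_append, ih]
      have h0 := stride_succ 0 m (by norm_num)
      have h1 := stride_succ 1 m (by norm_num)
      have h2 := stride_succ 2 m (by norm_num)
      norm_num at h0 h1 h2
      have hmod : PySem.Int.mod (m : Int) 3 = ((m % 3 : ℕ) : Int) := by
        exact_mod_cast PySem.Int.mod_natCast m 3
      push_cast
      rw [h0, h1, h2]
      simp only [List.map_cons, List.map_nil, List.foldl_cons, List.foldl_nil]
      have hd : ((3 : Int) ∣ (m : Int)) ↔ m % 3 = 0 := by omega
      have he1 : ((m : Int) % 3 = 1) ↔ m % 3 = 1 := by omega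
      rcases (by omega : m % 3 = 0 ∨ m % 3 = 1 ∨ m % 3 = 2) with h | h | h
      · by_cases hp : p (m : Int) <;>
          simp [h, hp, hd, pvPut, List.filter_append, List.map_append]
      · by_cases hp : p (m : Int) <;>
          simp [h, hp, hd, he1, pvPut, List.filter_append, List.map_append]
      · by_cases hp : p (m : Int) <;>
          simp [h, hp, hd, he1, pvPut, List.filter_append, List.map_append]

-- B's unconditional pass is the p = true instance
lemma foldl_put_eq_true_filter (g : Int → String) (l : List Int)
    (t : List String × List String × List String) :
    l.foldl (fun t i => pvPut t i (g i)) t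
      = l.foldl (fun t i => if (fun _ : Int => true) i then pvPut t i (g i) else t) t := by
  simp

lemma pyRange_one_eq (m : ℕ) :
    PySem.List.pyRange 0 (m : Int) 1 = (List.range m).map (fun j : ℕ => (j : Int)) :=
  PySem.List.pyRange_zero_natCast m

-- ===== VERDICT (by name: the statement is the Claim_ definition above) =====
theorem subSeq_spec : Claim_equal_subSeq := by
  intro seq w k _
  unfold Spec_subSeq subSeq subSeq_alt
  by_cases hw : w = 1
  · rw [if_neg (not_not_intro hw), if_pos hw, pyRange_one_eq, foldl_put_eq_true_filter,
      tripleFold (fun _ => true) (pvChar seq.toList) seq.toList.length]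
    simp only [PySem.List.foldl_append_singleton_eq_map, List.nil_append, List.filter_true]
  · rw [if_pos hw, if_neg hw, pyRange_one_eq,
      tripleFold (fun i => (decide (0 ≤ w - 2 + i + k) && decide (w - 2 + i + k < (seq.toList.length : Int))))
        (pvItem seq.toList w k) seq.toList.length]
    simp only [PySem.List.foldl_append_if, List.nil_append]
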